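-- pv_equiv track=rewrite | github.com/JasonPuglisi/e-note-ion | tests/test_moon.py | _count_visual_width
-- ===== SOURCE A (Python) =====
-- _COLOR_TAGS = {'[W]', '[K]', '[R]', '[O]', '[Y]', '[G]', '[B]', '[V]'}
--
-- _TAG_LEN = 3  # each tag is exactly 3 characters
--
-- def _count_visual_width(row: str) -> int:
--   """Count the number of color-tag characters in a moon row string."""
--   count = 0
--   i = 0
--   while i < len(row):
--     if row[i] == '[' and row[i : i + _TAG_LEN] in _COLOR_TAGS:
--       count += 1
--       i += _TAG_LEN
--     else:
--       i += 1
--   return count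
-- ===== SOURCE B (Python) =====
-- _COLOR_TAGS = {'[W]', '[K]', '[R]', '[O]', '[Y]', '[G]', '[B]', '[V]'}
--
-- def _count_visual_width(row: str) -> int:
--   """Count color tags: check every position's 3-char window (tags cannot overlap)."""
--   return sum(row[i:i + 3] in _COLOR_TAGS for i in range(len(row)))
-- ===== Notes on version B (the rewrite author's own statement) =====
-- stated objective: idiomatic
-- what changed: B replaces A's indexed while-loop that skips 3 positions after a tag match with a one-line sum over every 3-char window of the string; equal because the 3-char tags all start with '[' and cannot overlap.
import Mathlib
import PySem

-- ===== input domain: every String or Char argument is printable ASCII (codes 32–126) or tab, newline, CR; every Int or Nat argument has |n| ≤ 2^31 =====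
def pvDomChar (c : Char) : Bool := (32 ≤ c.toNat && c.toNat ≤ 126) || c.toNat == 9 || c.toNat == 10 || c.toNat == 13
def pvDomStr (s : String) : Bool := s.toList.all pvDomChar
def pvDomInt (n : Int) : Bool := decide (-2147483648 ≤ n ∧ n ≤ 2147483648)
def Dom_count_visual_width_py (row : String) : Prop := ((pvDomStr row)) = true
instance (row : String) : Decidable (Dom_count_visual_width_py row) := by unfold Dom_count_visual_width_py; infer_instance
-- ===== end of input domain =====

-- B replaces A's skip-3-on-match while loop by a sum over all 3-char windows (idiomatic one-liner);
-- equal because the tags all start with '[' and never overlap.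

-- ===== PORT A =====
-- _COLOR_TAGS, as the list of its (distinct) elements' character lists
def pvColorTags : List (List Char) :=
  [['[','W',']'], ['[','K',']'], ['[','R',']'], ['[','O',']'],
   ['[','Y',']'], ['[','G',']'], ['[','B',']'], ['[','V',']']]

-- the while loop of A over the remaining suffix of the row: row[i] is the head,
-- row[i:i+3] is (take 3), i += 3 drops head + 2 more, i += 1 drops the head
def pvLoopA : List Char → Int
  | [] => 0
  | c :: rest =>
    if c = '[' ∧ pvColorTags.contains ((c :: rest).take 3) = true then
      1 + pvLoopA (rest.drop 2)
    else
      pvLoopA rest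
termination_by l => l.length
decreasing_by all_goals simp

def count_visual_width_py (row : String) : Int := pvLoopA row.toList

-- ===== PORT B =====
-- sum(row[i:i+3] in _COLOR_TAGS for i in range(len(row))); each bool contributes 1 or 0
def count_visual_width_py_alt (row : String) : Int :=
  (List.range row.toList.length).foldl
    (fun (acc : Int) (i : Nat) =>
      acc + (if pvColorTags.contains
                 (PySem.List.slice row.toList (some (i : Int)) (some ((i : Int) + 3))) = true
             then (1 : Int) else 0))
    0

-- ===== PRECONDITION & SPEC =====
def Spec_count_visual_width_py (row : String) (out : Int) : Prop := out = count_visual_width_py_alt row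
instance (row : String) (out : Int) : Decidable (Spec_count_visual_width_py row out) := by unfold Spec_count_visual_width_py; infer_instance

-- ===== CLAIM (what is proved, stated in full; the proofs are below) =====
def Claim_equal_count_visual_width_py : Prop := ∀ (row : String), Dom_count_visual_width_py row → Spec_count_visual_width_py row (count_visual_width_py row)

-- ===== LEMMAS AND PROOFS =====

-- per-window contribution, on the suffix starting at the position
def pvWin (l : List Char) : Int :=
  if pvColorTags.contains (l.take 3) = true then 1 else 0

-- structural form of B: add every window's contribution
def pvG : List Char → Int
  | [] => 0
  | c :: rest => pvWin (c :: rest) + pvG rest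

-- a window whose first character is not '[' contributes nothing
lemma pvWin_not_lbrack (c : Char) (t : List Char) (hc : c ≠ '[') :
    pvWin (c :: t) = 0 := by
  unfold pvWin
  rw [if_neg]
  intro hcon
  rcases t with _ | ⟨b, t⟩
  · simp [pvColorTags] at hcon
  · rcases t with _ | ⟨d, t⟩
    · simp [pvColorTags] at hcon
    · simp [pvColorTags] at hcon
      rcases hcon with ⟨h1, _⟩ | ⟨h1, _⟩ | ⟨h1, _⟩ | ⟨h1, _⟩ | ⟨h1, _⟩ | ⟨h1, _⟩ | ⟨h1, _⟩ | ⟨h1, _⟩ <;> exact hc h1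

-- A's skipping loop computes the all-windows sum: tags start with '[' and never overlap
lemma pvG_eq_loopA (l : List Char) : pvG l = pvLoopA l := by
  induction l using pvLoopA.induct with
  | case1 => simp [pvG, pvLoopA]
  | case2 c rest h ih =>
    obtain ⟨hc, htag⟩ := h
    subst hc
    match rest, htag, ih with
    | [], htag, ih => simp [pvColorTags] at htag
    | [b], htag, ih => simp [pvColorTags] at htag
    | b :: d :: r, htag, ih =>
      have ih' : pvG r = pvLoopA r := by simpa using ih
      have hshape : (b = 'W' ∨ b = 'K' ∨ b = 'R' ∨ b = 'O' ∨ b = 'Y' ∨ b = 'G' ∨ b = 'B' ∨ b = 'V') ∧ d = ']' := by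
        simp [pvColorTags] at htag
        rcases htag with ⟨hb, hd⟩ | ⟨hb, hd⟩ | ⟨hb, hd⟩ | ⟨hb, hd⟩ | ⟨hb, hd⟩ | ⟨hb, hd⟩ | ⟨hb, hd⟩ | ⟨hb, hd⟩ <;>
          exact ⟨by simp [hb], hd⟩
      obtain ⟨hb, hd⟩ := hshape
      subst hd
      rcases hb with hb | hb | hb | hb | hb | hb | hb | hb <;> subst hb <;>
        simp [pvLoopA, pvG, pvWin, pvColorTags, ih']
  | case3 c rest h ih =>
    rw [pvLoopA, if_neg h, pvG, ih]
    by_cases hc : c = '['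
    · subst hc
      have hwin : pvWin ('[' :: rest) = 0 := by
        unfold pvWin
        rw [if_neg]
        intro hcon
        exact h ⟨rfl, hcon⟩
      rw [hwin]; ring
    · rw [pvWin_not_lbrack c rest hc]; ring

-- B's fold over range(len) equals the structural all-windows sum
lemma pvFold_eq_pvG (l : List Char) (acc : Int) :
    (List.range l.length).foldl
      (fun (acc : Int) (i : Nat) =>
        acc + (if pvColorTags.contains
            (PySem.List.slice l (some (i : Int)) (some ((i : Int) + 3))) = true
          then (1 : Int) else 0)) acc
    = acc + pvG l := by
  induction l generalizing acc with
  | nil => simp [pvG]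
  | cons c rest ih =>
    have hslice : ∀ (i : Nat) (xs : List Char),
        PySem.List.slice xs (some (i : Int)) (some ((i : Int) + 3)) = (xs.drop i).take 3 := by
      intro i xs
      have := PySem.List.slice_natCast_add xs i 3
      simpa using this
    rw [List.length_cons, List.range_succ_eq_map, List.foldl_cons, List.foldl_map]
    have hstep :
        (List.range rest.length).foldl
          (fun (acc : Int) (i : Nat) =>
            acc + (if pvColorTags.contains
                (PySem.List.slice (c :: rest) (some ((i.succ : Nat) : Int)) (some (((i.succ : Nat) : Int) + 3))) = true
              then (1 : Int) else 0))
          (acc + (if pvColorTags.contains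
              (PySem.List.slice (c :: rest) (some ((0 : Nat) : Int)) (some (((0 : Nat) : Int) + 3))) = true
            then (1 : Int) else 0))
        = (acc + pvWin (c :: rest)) + pvG rest := by
      have hbody : ∀ (a : Int) (i : Nat),
          (fun (acc : Int) (i : Nat) =>
            acc + (if pvColorTags.contains
                (PySem.List.slice (c :: rest) (some ((i.succ : Nat) : Int)) (some (((i.succ : Nat) : Int) + 3))) = true
              then (1 : Int) else 0)) a i
          = (fun (acc : Int) (i : Nat) =>
            acc + (if pvColorTags.contains
                (PySem.List.slice rest (some (i : Int)) (some ((i : Int) + 3))) = true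
              then (1 : Int) else 0)) a i := by
        intro a i
        simp only [hslice, Nat.succ_eq_add_one, List.drop_succ_cons]
      rw [funext fun a => funext fun i => hbody a i, ih]
      congr 1
      rw [hslice 0 (c :: rest)]
      simp [pvWin]
    rw [hstep, pvG]
    ring

-- ===== VERDICT (by name: the statement is the Claim_ definition above) =====
theorem count_visual_width_py_spec : Claim_equal_count_visual_width_py := by
  intro row _
  unfold Spec_count_visual_width_py count_visual_width_py count_visual_width_py_alt
  rw [pvFold_eq_pvG row.toList 0, pvG_eq_loopA]
  ring
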